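-- pv_equiv track=rewrite | github.com/AbrorilHuda/detection-phising | expert_system.py | _check_typosquatting_patterns
-- ===== SOURCE A (Python) =====
-- def _check_typosquatting_patterns(test_domain, original_domain):
--     """Cek pola typosquatting yang umum"""
--     patterns = [
--         # Character substitution
--         lambda x, y: x.replace('o', '0') == y or x.replace('0', 'o') == y,
--         # Character insertion
--         lambda x, y: any(x[:i] + x[i+1:] == y for i in range(len(x))),
--         # Character deletion
--         lambda x, y: any(x[:i] + c + x[i:] == y for i in range(len(x)+1) for c in 'abcdefghijklmnopqrstuvwxyz'),
--         # Common misspellings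
--         lambda x, y: x.replace('gmail', 'gmai1') == y or x.replace('paypal', 'paypa1') == y
--     ]
--
--     return any(pattern(test_domain, original_domain) for pattern in patterns)
-- ===== SOURCE B (Python) =====
-- _LOWER = set('abcdefghijklmnopqrstuvwxyz')
--
-- def _check_typosquatting_patterns(test_domain, original_domain):
--     x, y = test_domain, original_domain
--     # character substitution
--     if x.replace('o', '0') == y or x.replace('0', 'o') == y:
--         return True
--     # y is x with one character deleted: two-pointer, O(n)
--     if len(y) + 1 == len(x):
--         i = 0
--         while i < len(y) and x[i] == y[i]:
--             i += 1
--         if x[i+1:] == y[i:]: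
--             return True
--     # y is x with one lowercase letter inserted: two-pointer, O(n)
--     if len(y) == len(x) + 1:
--         i = 0
--         while i < len(x) and x[i] == y[i]:
--             i += 1
--         if y[i] in _LOWER and y[i+1:] == x[i:]:
--             return True
--     # common misspellings
--     return x.replace('gmail', 'gmai1') == y or x.replace('paypal', 'paypa1') == y
-- ===== Notes on version B (the rewrite author's own statement) =====
-- stated objective: faster
-- what changed: A tries every deletion/insertion position by building a new sliced string and comparing it whole (quadratic, with a 26-way inner loop for insertions); B first checks the length difference, then finds the single first-mismatch position with a two-pointer scan and compares the remaining suffix once, in linear time.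
import Mathlib
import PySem

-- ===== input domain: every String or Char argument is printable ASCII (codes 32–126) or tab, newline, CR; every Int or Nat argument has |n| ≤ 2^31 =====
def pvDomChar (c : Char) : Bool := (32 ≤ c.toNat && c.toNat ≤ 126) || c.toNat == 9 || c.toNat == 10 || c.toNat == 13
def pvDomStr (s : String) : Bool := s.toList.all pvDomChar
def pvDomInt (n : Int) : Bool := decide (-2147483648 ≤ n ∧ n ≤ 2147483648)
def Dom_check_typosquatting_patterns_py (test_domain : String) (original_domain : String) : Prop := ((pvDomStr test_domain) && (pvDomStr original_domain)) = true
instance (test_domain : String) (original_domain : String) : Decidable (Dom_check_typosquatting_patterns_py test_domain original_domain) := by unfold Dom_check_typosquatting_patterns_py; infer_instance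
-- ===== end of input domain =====

-- B replaces A's quadratic slice-and-compare scans for one-character deletion/insertion
-- by linear two-pointer checks (first-mismatch + suffix comparison); objective: faster.

-- ===== PORT A =====
def pvLower : List Char := "abcdefghijklmnopqrstuvwxyz".toList

def pvA_del (x y : List Char) : Bool :=
  (PySem.List.pyRange 0 (x.length : Int)).any fun i =>
    PySem.List.slice x none (some i) ++ PySem.List.slice x (some (i+1)) none == y

def pvA_ins (x y : List Char) : Bool :=
  (PySem.List.pyRange 0 ((x.length : Int) + 1)).any fun i =>
    pvLower.any fun c =>
      PySem.List.slice x none (some i) ++ c :: PySem.List.slice x (some i) none == y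

def pvA_main (x y : List Char) : Bool :=
  (PySem.Chars.replace x "o".toList "0".toList == y
      || PySem.Chars.replace x "0".toList "o".toList == y)
  || pvA_del x y
  || pvA_ins x y
  || (PySem.Chars.replace x "gmail".toList "gmai1".toList == y
      || PySem.Chars.replace x "paypal".toList "paypa1".toList == y)

def check_typosquatting_patterns_py (test_domain : String) (original_domain : String) : Bool :=
  pvA_main test_domain.toList original_domain.toList

-- ===== PORT B =====
def pvTwoPtrDel : List Char → List Char → Bool
  | a :: as, b :: bs => if a == b then pvTwoPtrDel as bs else as == b :: bs
  | as, [] => as.tail == []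
  | [], _ :: _ => false

def pvTwoPtrIns : List Char → List Char → Bool
  | a :: as, b :: bs => if a == b then pvTwoPtrIns as bs else pvLower.contains b && bs == a :: as
  | [], b :: bs => pvLower.contains b && bs == []
  | _, [] => false

def pvB_main (x y : List Char) : Bool :=
  if PySem.Chars.replace x "o".toList "0".toList == y
      || PySem.Chars.replace x "0".toList "o".toList == y then true
  else if y.length + 1 == x.length && pvTwoPtrDel x y then true
  else if y.length == x.length + 1 && pvTwoPtrIns x y then true
  else PySem.Chars.replace x "gmail".toList "gmai1".toList == y
      || PySem.Chars.replace x "paypal".toList "paypa1".toList == y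

def check_typosquatting_patterns_py_alt (test_domain : String) (original_domain : String) : Bool :=
  pvB_main test_domain.toList original_domain.toList

-- ===== PRECONDITION & SPEC =====
def Spec_check_typosquatting_patterns_py (test_domain : String) (original_domain : String) (out : Bool) : Prop := out = check_typosquatting_patterns_py_alt test_domain original_domain
instance (test_domain : String) (original_domain : String) (out : Bool) : Decidable (Spec_check_typosquatting_patterns_py test_domain original_domain out) := by unfold Spec_check_typosquatting_patterns_py; infer_instance

-- ===== CLAIM =====
def Claim_equal_check_typosquatting_patterns_py : Prop := ∀ (test_domain : String) (original_domain : String), Dom_check_typosquatting_patterns_py test_domain original_domain → Spec_check_typosquatting_patterns_py test_domain original_domain (check_typosquatting_patterns_py test_domain original_domain)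

-- ===== LEMMAS AND PROOFS =====

lemma del_iff (x y : List Char) :
    (∃ k, k < x.length ∧ x.take k ++ x.drop (k+1) = y) ↔
      (y.length + 1 = x.length ∧ pvTwoPtrDel x y = true) := by
  induction x generalizing y with
  | nil => simp
  | cons a as ih =>
    cases y with
    | nil =>
      constructor
      · rintro ⟨k, hk, he⟩
        cases k with
        | zero => simp_all [pvTwoPtrDel]
        | succ j => simp at he
      · rintro ⟨hlen, _⟩
        have h0 : as = [] := by
          simp only [List.length_cons, List.length_nil] at hlen
          exact List.length_eq_zero_iff.mp (by omega)
        exact ⟨0, by simp, by simp [h0]⟩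
    | cons b bs =>
      by_cases hab : a = b
      · subst hab
        have step : (∃ k, k < (a :: as).length ∧ (a :: as).take k ++ (a :: as).drop (k+1) = a :: bs)
            ↔ (∃ k, k < as.length ∧ as.take k ++ as.drop (k+1) = bs) := by
          constructor
          · rintro ⟨k, hk, he⟩
            cases k with
            | zero =>
              simp at he
              exact ⟨0, by simp [he], by simp [he]⟩
            | succ j =>
              simp only [List.take_succ_cons, List.drop_succ_cons, List.cons_append] at he
              injection he with _ h2
              simp only [List.length_cons] at hk
              exact ⟨j, by omega, h2⟩
          · rintro ⟨j, hj, he⟩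
            refine ⟨j + 1, by simp only [List.length_cons]; omega, ?_⟩
            simp only [List.take_succ_cons, List.drop_succ_cons, List.cons_append, he]
        rw [step, ih bs]
        simp only [pvTwoPtrDel, beq_self_eq_true, if_true, List.length_cons]
        constructor
        · rintro ⟨h1, h2⟩; exact ⟨by omega, h2⟩
        · rintro ⟨h1, h2⟩; exact ⟨by omega, h2⟩
      · constructor
        · rintro ⟨k, hk, he⟩
          cases k with
          | zero =>
            simp at he
            refine ⟨by simp [he], ?_⟩
            simp [pvTwoPtrDel, hab, he]
          | succ j =>
            simp only [List.take_succ_cons, List.drop_succ_cons, List.cons_append] at he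
            injection he with h1 _
            exact absurd h1 hab
        · rintro ⟨hlen, htp⟩
          simp only [pvTwoPtrDel, beq_iff_eq, if_neg hab] at htp
          have hbs : as = b :: bs := by simpa using htp
          exact ⟨0, by simp, by simp [hbs]⟩

lemma ins_iff (x y : List Char) :
    (∃ k, k ≤ x.length ∧ ∃ c ∈ pvLower, x.take k ++ c :: x.drop k = y) ↔
      (y.length = x.length + 1 ∧ pvTwoPtrIns x y = true) := by
  induction x generalizing y with
  | nil =>
    cases y with
    | nil => simp
    | cons b bs =>
      constructor
      · rintro ⟨k, hk, c, hc, he⟩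
        have hk0 : k = 0 := by simpa using hk
        subst hk0
        simp at he
        obtain ⟨rfl, hbs⟩ := he
        refine ⟨by simp [hbs], ?_⟩
        simp [pvTwoPtrIns, hbs, hc]
      · rintro ⟨hlen, htp⟩
        simp only [pvTwoPtrIns, Bool.and_eq_true, beq_iff_eq] at htp
        exact ⟨0, by simp, b, List.mem_of_elem_eq_true htp.1, by simp [htp.2]⟩
  | cons a as ih =>
    cases y with
    | nil =>
      constructor
      · rintro ⟨k, hk, c, hc, he⟩; simp at he
      · rintro ⟨hlen, _⟩; simp at hlen
    | cons b bs =>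
      by_cases hab : a = b
      · subst hab
        have step : (∃ k, k ≤ (a :: as).length ∧ ∃ c ∈ pvLower, (a :: as).take k ++ c :: (a :: as).drop k = a :: bs)
            ↔ (∃ k, k ≤ as.length ∧ ∃ c ∈ pvLower, as.take k ++ c :: as.drop k = bs) := by
          constructor
          · rintro ⟨k, hk, c, hc, he⟩
            cases k with
            | zero =>
              simp at he
              exact ⟨0, by simp, c, hc, by simp [← he.2, he.1]⟩
            | succ j =>
              simp only [List.take_succ_cons, List.cons_append] at he
              injection he with _ h2
              simp only [List.length_cons] at hk
              exact ⟨j, by omega, c, hc, by simpa using h2⟩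
          · rintro ⟨j, hj, c, hc, he⟩
            refine ⟨j + 1, by simp only [List.length_cons]; omega, c, hc, ?_⟩
            simp only [List.take_succ_cons, List.cons_append, List.drop_succ_cons]
            rw [he]
        rw [step, ih bs]
        simp only [pvTwoPtrIns, beq_self_eq_true, if_true, List.length_cons]
        constructor
        · rintro ⟨h1, h2⟩; exact ⟨by omega, h2⟩
        · rintro ⟨h1, h2⟩; exact ⟨by omega, h2⟩
      · constructor
        · rintro ⟨k, hk, c, hc, he⟩
          cases k with
          | zero =>
            simp at he
            obtain ⟨rfl, hbs⟩ := he
            refine ⟨by simp [← hbs], ?_⟩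
            simp [pvTwoPtrIns, hab, ← hbs, hc]
          | succ j =>
            simp only [List.take_succ_cons, List.cons_append] at he
            injection he with h1 _
            exact absurd h1 hab
        · rintro ⟨hlen, htp⟩
          simp only [pvTwoPtrIns, beq_iff_eq, if_neg hab, Bool.and_eq_true] at htp
          exact ⟨0, by simp, b, List.mem_of_elem_eq_true htp.1, by simp [htp.2]⟩

lemma pvA_del_iff (x y : List Char) :
    pvA_del x y = true ↔ ∃ k, k < x.length ∧ x.take k ++ x.drop (k+1) = y := by
  unfold pvA_del
  rw [List.any_eq_true]
  constructor
  · rintro ⟨i, hm, he⟩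
    rw [PySem.List.mem_pyRange_one] at hm
    lift i to ℕ using hm.1 with k
    refine ⟨k, by exact_mod_cast hm.2, ?_⟩
    rw [PySem.List.slice_to_natCast] at he
    have h1 : ((k : Int) + 1) = ((k + 1 : ℕ) : Int) := by push_cast; ring
    rw [h1, PySem.List.slice_from_natCast] at he
    exact beq_iff_eq.mp he
  · rintro ⟨k, hk, he⟩
    refine ⟨(k : Int), ?_, ?_⟩
    · rw [PySem.List.mem_pyRange_one]
      constructor
      · positivity
      · exact_mod_cast hk
    · rw [PySem.List.slice_to_natCast]
      have h1 : ((k : Int) + 1) = ((k + 1 : ℕ) : Int) := by push_cast; ring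
      rw [h1, PySem.List.slice_from_natCast]
      exact beq_iff_eq.mpr he

lemma pvA_ins_iff (x y : List Char) :
    pvA_ins x y = true ↔ ∃ k, k ≤ x.length ∧ ∃ c ∈ pvLower, x.take k ++ c :: x.drop k = y := by
  unfold pvA_ins
  rw [List.any_eq_true]
  constructor
  · rintro ⟨i, hm, he⟩
    rw [PySem.List.mem_pyRange_one] at hm
    rw [List.any_eq_true] at he
    obtain ⟨c, hc, he⟩ := he
    lift i to ℕ using hm.1 with k
    refine ⟨k, by exact_mod_cast (by omega : (k:Int) ≤ x.length), c, hc, ?_⟩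
    rw [PySem.List.slice_to_natCast, PySem.List.slice_from_natCast] at he
    exact beq_iff_eq.mp he
  · rintro ⟨k, hk, c, hc, he⟩
    refine ⟨(k : Int), ?_, ?_⟩
    · rw [PySem.List.mem_pyRange_one]
      exact ⟨by positivity, by exact_mod_cast Nat.lt_succ_of_le hk⟩
    · rw [List.any_eq_true]
      exact ⟨c, hc, by rw [PySem.List.slice_to_natCast, PySem.List.slice_from_natCast]; exact beq_iff_eq.mpr he⟩

lemma pvA_del_eq (x y : List Char) :
    pvA_del x y = ((y.length + 1 == x.length) && pvTwoPtrDel x y) := by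
  rw [Bool.eq_iff_iff, pvA_del_iff, del_iff]
  simp

lemma pvA_ins_eq (x y : List Char) :
    pvA_ins x y = ((y.length == x.length + 1) && pvTwoPtrIns x y) := by
  rw [Bool.eq_iff_iff, pvA_ins_iff, ins_iff]
  simp

lemma pv_main_eq (x y : List Char) : pvA_main x y = pvB_main x y := by
  unfold pvA_main pvB_main
  rw [pvA_del_eq, pvA_ins_eq]
  generalize (PySem.Chars.replace x "o".toList "0".toList == y
      || PySem.Chars.replace x "0".toList "o".toList == y) = p1
  generalize ((y.length + 1 == x.length) && pvTwoPtrDel x y) = p2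
  generalize ((y.length == x.length + 1) && pvTwoPtrIns x y) = p3
  generalize (PySem.Chars.replace x "gmail".toList "gmai1".toList == y
      || PySem.Chars.replace x "paypal".toList "paypa1".toList == y) = p4
  cases p1 <;> cases p2 <;> cases p3 <;> cases p4 <;> simp

-- ===== VERDICT =====
theorem check_typosquatting_patterns_py_spec : Claim_equal_check_typosquatting_patterns_py := by
  intro t o _
  unfold Spec_check_typosquatting_patterns_py check_typosquatting_patterns_py check_typosquatting_patterns_py_alt
  exact pv_main_eq _ _
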